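-- pv_equiv track=rewrite | github.com/pkage/food_co2 | backend/carbon.py | splitshit
-- ===== SOURCE A (Python) =====
-- def splitshit(quantity):
--     firstnonnum = 0
--     for i in range(len(quantity)):
--         if quantity[i].isdigit():
--             firstnonnum = i
--     firstnonnum += 1
--     units = firstnonnum
--     if quantity[units] == ' ':
--         units += 1
--
--     return [quantity[:firstnonnum], quantity[units:]]
-- ===== SOURCE B (Python) =====
-- def splitshit(quantity):
--     idx = 1
--     for i in range(len(quantity) - 1, -1, -1):
--         if quantity[i].isdigit():
--             idx = i + 1
--             break
--     units = idx + 1 if quantity[idx] == ' ' else idx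
--     return [quantity[:idx], quantity[units:]]
-- ===== Notes on version B (the rewrite author's own statement) =====
-- stated objective: alternative
-- what changed: B replaces A's full forward scan that keeps overwriting the last digit position with a backward scan from the end that breaks at the first digit found, then slices as before.
import Mathlib
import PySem

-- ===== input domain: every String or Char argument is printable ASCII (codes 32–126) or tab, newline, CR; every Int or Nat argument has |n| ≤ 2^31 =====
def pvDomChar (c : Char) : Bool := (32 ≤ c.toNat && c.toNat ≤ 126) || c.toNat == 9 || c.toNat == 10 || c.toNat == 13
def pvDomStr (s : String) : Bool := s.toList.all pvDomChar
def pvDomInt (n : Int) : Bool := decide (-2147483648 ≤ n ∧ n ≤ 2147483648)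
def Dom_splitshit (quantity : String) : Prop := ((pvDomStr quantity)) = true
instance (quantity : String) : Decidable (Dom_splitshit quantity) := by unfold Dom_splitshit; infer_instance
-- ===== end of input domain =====

-- B scans backwards from the last index and breaks on the first digit found
-- (which is A's last digit) instead of A's full forward scan; objective: alternative decomposition.

-- ===== PORT A =====
-- A: forward loop over all indices keeping the LAST digit position, then slice.
def splitshit (quantity : String) : List String :=
  let cs := quantity.toList
  let firstnonnum : Int :=
    (PySem.List.pyRange 0 (cs.length : Int) 1).foldl
      (fun acc i => if PySem.Chars.isdigit (PySem.List.pyGetD cs i ' ') then i else acc) 0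
  let firstnonnum := firstnonnum + 1
  let units := firstnonnum
  -- quantity[units] raises IndexError when units = len(quantity); excluded by Pre_ below
  let units := if PySem.List.pyGetD cs units ' ' == ' ' then units + 1 else units
  [String.ofList (PySem.List.slice cs none (some firstnonnum)),
   String.ofList (PySem.List.slice cs (some units) none)]

-- ===== PORT B =====
-- B's loop: for i in range(len-1, -1, -1): if digit: idx = i+1; break   (else idx stays 1)
def pvRevFind (cs : List Char) : List Int → Int
  | [] => 1
  | i :: rest =>
      if PySem.Chars.isdigit (PySem.List.pyGetD cs i ' ') then i + 1 else pvRevFind cs rest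

def splitshit_alt (quantity : String) : List String :=
  let cs := quantity.toList
  let idx := pvRevFind cs (PySem.List.pyRange ((cs.length : Int) - 1) (-1) (-1))
  let units := if PySem.List.pyGetD cs idx ' ' == ' ' then idx + 1 else idx
  [String.ofList (PySem.List.slice cs none (some idx)),
   String.ofList (PySem.List.slice cs (some units) none)]

-- ===== PRECONDITION & SPEC =====
-- Pre_ excludes exactly the inputs on which A (and B) raise IndexError at quantity[units]:
-- strings of length < 2 and strings whose last character is a digit.
def Pre_splitshit (quantity : String) : Prop :=
  2 ≤ quantity.toList.length ∧ PySem.Chars.isdigit (quantity.toList.getLastD ' ') = false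
instance (quantity : String) : Decidable (Pre_splitshit quantity) := by
  unfold Pre_splitshit; infer_instance

def pvWitness_splitshit : String := "3 kg"

def Spec_splitshit (quantity : String) (out : List String) : Prop := out = splitshit_alt quantity
instance (quantity : String) (out : List String) : Decidable (Spec_splitshit quantity out) := by
  unfold Spec_splitshit; infer_instance

-- ===== CLAIM (what is proved, stated in full; the proofs are below) =====
def Claim_equal_splitshit : Prop := ∀ (quantity : String), Dom_splitshit quantity → Pre_splitshit quantity → Spec_splitshit quantity (splitshit quantity)

-- ===== LEMMAS AND PROOFS =====

-- A's accumulator loop returns the last hit of p (default a0)…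
theorem foldl_lastHit (p : Int → Bool) (l : List Int) (a : Int) :
    l.foldl (fun acc i => if p i then i else acc) a
      = (match l.reverse.find? p with | some i => i | none => a) := by
  induction l generalizing a with
  | nil => simp
  | cons x xs ih =>
      simp only [List.foldl_cons, List.reverse_cons, List.find?_append, ih]
      cases h : xs.reverse.find? p with
      | some i => simp
      | none => by_cases hx : p x <;> simp [hx]

-- …and B's break-loop returns (first hit of p) + 1 (default 1).
theorem pvRevFind_eq (cs : List Char) (l : List Int) :
    pvRevFind cs l
      = (match l.find? (fun i => PySem.Chars.isdigit (PySem.List.pyGetD cs i ' ')) with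
         | some i => i + 1 | none => 1) := by
  induction l with
  | nil => simp [pvRevFind]
  | cons x xs ih =>
      by_cases hx : PySem.Chars.isdigit (PySem.List.pyGetD cs x ' ') <;>
        simp [pvRevFind, hx, ih]

-- ===== VERDICT (by name: the statement is the Claim_ definition above) =====
theorem splitshit_spec : Claim_equal_splitshit := by
  intro quantity _ _
  show _ = _
  simp only [splitshit, splitshit_alt]
  have hrange : PySem.List.pyRange ((quantity.toList.length : Int) - 1) (-1) (-1)
      = (PySem.List.pyRange 0 (quantity.toList.length : Int) 1).reverse := by
    rw [PySem.List.pyRange_neg_one_eq_reverse]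
    norm_num
  rw [hrange, pvRevFind_eq,
      foldl_lastHit (fun i => PySem.Chars.isdigit (PySem.List.pyGetD quantity.toList i ' '))]
  cases h : (PySem.List.pyRange 0 (quantity.toList.length : Int) 1).reverse.find?
      (fun i => PySem.Chars.isdigit (PySem.List.pyGetD quantity.toList i ' ')) <;> simp
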